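-- pv_equiv track=rewrite | github.com/10234567Z/aptos-core | scripts/apply_gas_multiplier.py | top_level_commas
-- ===== SOURCE A (Python) =====
-- def top_level_commas(text):
--     """
--     Return the positions of commas in `text` that are not inside (), [], {},
--     or string literals (depth 0).
--     """
--     positions = []
--     depth = 0
--     i = 0
--     n = len(text)
--     while i < n:
--         c = text[i]
--         if c in "([{":
--             depth += 1
--         elif c in ")]}":
--             depth -= 1
--         elif c == '"':
--             i += 1
--             while i < n and text[i] != '"':
--                 if text[i] == "\\" and i + 1 < n:
--                     i += 1
--                 i += 1
--         elif c == "," and depth == 0: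
--             positions.append(i)
--         i += 1
--     return positions
-- ===== SOURCE B (Python) =====
-- def top_level_commas(text):
--     """
--     Return the positions of commas in `text` that are not inside (), [], {},
--     or string literals (depth 0).
--     """
--     positions = []
--     depth = 0
--     in_string = False
--     escaped = False
--     for i, c in enumerate(text):
--         if escaped:
--             escaped = False
--         elif in_string:
--             if c == "\\":
--                 escaped = True
--             elif c == '"':
--                 in_string = False
--         elif c in "([{":
--             depth += 1
--         elif c in ")]}":
--             depth -= 1
--         elif c == '"':
--             in_string = True
--         elif c == "," and depth == 0:
--             positions.append(i)
--     return positions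
-- ===== Notes on version B (the rewrite author's own statement) =====
-- stated objective: simpler
-- what changed: Replaced A's nested inner while-loop that manually advances the index past string literals with a single flat enumerate loop that carries explicit in_string/escaped boolean state flags.
import Mathlib
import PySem

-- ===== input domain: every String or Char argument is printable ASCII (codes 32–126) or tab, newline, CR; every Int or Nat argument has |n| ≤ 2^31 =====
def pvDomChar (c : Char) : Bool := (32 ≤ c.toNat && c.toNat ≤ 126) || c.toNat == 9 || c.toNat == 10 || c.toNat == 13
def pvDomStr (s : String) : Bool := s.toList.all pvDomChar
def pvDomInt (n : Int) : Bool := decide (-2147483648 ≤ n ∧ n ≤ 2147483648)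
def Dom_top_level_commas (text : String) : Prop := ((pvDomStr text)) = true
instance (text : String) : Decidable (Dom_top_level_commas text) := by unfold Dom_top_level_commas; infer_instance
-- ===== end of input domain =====

-- B replaces A's nested index-advancing inner while-loop for string literals by a single
-- flat pass maintaining explicit `in_string`/`escaped` state flags (objective: simpler).

-- ===== PORT A =====
-- A's inner `while i < n and text[i] != '"': …` loop: consumes the characters of the string
-- literal (and the closing quote, merging the outer loop's final `i += 1`), returning the
-- remaining characters and the index where the outer loop resumes.
def tlcSkipStr : List Char → Int → List Char × Int
  | [], i => ([], i)
  | c :: rest, i =>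
    if c = '"' then (rest, i + 1)
    else if c = '\\' then
      match rest with
      | [] => ([], i + 1)
      | _ :: rest' => tlcSkipStr rest' (i + 2)
    else tlcSkipStr rest (i + 1)

-- needed by tlcLoopA's decreasing_by
theorem tlcSkipStr_length_le (l : List Char) (i : Int) :
    (tlcSkipStr l i).1.length ≤ l.length := by
  induction l, i using tlcSkipStr.induct with
  | case1 i => rw [tlcSkipStr.eq_def]
  | case2 rest i => rw [tlcSkipStr.eq_def]; simp
  | case3 i h => rw [tlcSkipStr.eq_def]; simp
  | case4 i head rest' h ih => rw [tlcSkipStr.eq_def]; simp; omega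
  | case5 c rest i h1 h2 ih => rw [tlcSkipStr.eq_def]; simp [h1, h2]; omega

-- A's outer `while i < n` loop
def tlcLoopA : List Char → Int → Int → List Int → List Int
  | [], _, _, pos => pos
  | c :: rest, i, depth, pos =>
    if c = '(' ∨ c = '[' ∨ c = '{' then tlcLoopA rest (i + 1) (depth + 1) pos
    else if c = ')' ∨ c = ']' ∨ c = '}' then tlcLoopA rest (i + 1) (depth - 1) pos
    else if c = '"' then
      let r := tlcSkipStr rest (i + 1)
      tlcLoopA r.1 r.2 depth pos
    else if c = ',' ∧ depth = 0 then tlcLoopA rest (i + 1) depth (pos ++ [i])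
    else tlcLoopA rest (i + 1) depth pos
  termination_by l => l.length
  decreasing_by
    · simp
    · simp
    · exact Nat.lt_succ_of_le (tlcSkipStr_length_le _ _)
    · simp
    · simp

def top_level_commas (text : String) : List Int :=
  tlcLoopA text.toList 0 0 []

-- ===== PORT B =====
-- one step of B's flat for-loop; state = (positions, depth, in_string, escaped)
def tlcStepB (st : List Int × Int × Bool × Bool) (p : Int × Char) : List Int × Int × Bool × Bool :=
  let (pos, depth, instr, esc) := st
  let (i, c) := p
  if esc then (pos, depth, instr, false)
  else if instr then
    if c = '\\' then (pos, depth, instr, true)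
    else if c = '"' then (pos, depth, false, esc)
    else st
  else if c = '(' ∨ c = '[' ∨ c = '{' then (pos, depth + 1, instr, esc)
  else if c = ')' ∨ c = ']' ∨ c = '}' then (pos, depth - 1, instr, esc)
  else if c = '"' then (pos, depth, true, esc)
  else if c = ',' ∧ depth = 0 then (pos ++ [i], depth, instr, esc)
  else st

def top_level_commas_alt (text : String) : List Int :=
  ((PySem.List.enumerate text.toList 0).foldl tlcStepB ([], 0, false, false)).1

-- ===== PRECONDITION & SPEC =====
def Spec_top_level_commas (text : String) (out : List Int) : Prop := out = top_level_commas_alt text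
instance (text : String) (out : List Int) : Decidable (Spec_top_level_commas text out) := by unfold Spec_top_level_commas; infer_instance

-- ===== CLAIM (what is proved, stated in full; the proofs are below) =====
def Claim_equal_top_level_commas : Prop := ∀ (text : String), Dom_top_level_commas text → Spec_top_level_commas text (top_level_commas text)

-- ===== LEMMAS AND PROOFS =====

-- unfolding lemmas for tlcSkipStr (its auto-generated equations are shape-split)
theorem tlcSkipStr_quote (rest : List Char) (i : Int) :
    tlcSkipStr ('"' :: rest) i = (rest, i + 1) := by
  rw [tlcSkipStr.eq_def]; simp

theorem tlcSkipStr_bs_nil (i : Int) : tlcSkipStr ['\\'] i = ([], i + 1) := by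
  rw [tlcSkipStr.eq_def]; simp

theorem tlcSkipStr_bs_cons (x : Char) (rest : List Char) (i : Int) :
    tlcSkipStr ('\\' :: x :: rest) i = tlcSkipStr rest (i + 2) := by
  rw [tlcSkipStr.eq_def]; simp

theorem tlcSkipStr_other (c : Char) (rest : List Char) (i : Int)
    (h1 : ¬ c = '"') (h2 : ¬ c = '\\') :
    tlcSkipStr (c :: rest) i = tlcSkipStr rest (i + 1) := by
  rw [tlcSkipStr.eq_def]; simp [h1, h2]

-- B's fold while in_string = true (escaped = false) tracks A's inner skip loop
theorem tlc_fold_instring (l : List Char) (i : Int) (d : Int) (p : List Int) :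
    ((PySem.List.enumerate l i).foldl tlcStepB (p, d, true, false)).1 =
      ((PySem.List.enumerate (tlcSkipStr l i).1 (tlcSkipStr l i).2).foldl tlcStepB
        (p, d, false, false)).1 := by
  induction l, i using tlcSkipStr.induct with
  | case1 i => rw [tlcSkipStr.eq_def]; simp [PySem.List.enumerate_nil]
  | case2 rest i =>
      rw [tlcSkipStr_quote]
      simp [PySem.List.enumerate_cons, tlcStepB]
  | case3 i h =>
      rw [tlcSkipStr_bs_nil]
      simp [PySem.List.enumerate_nil, PySem.List.enumerate_cons, tlcStepB]
  | case4 i head rest' h ih =>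
      rw [tlcSkipStr_bs_cons]
      simp only [PySem.List.enumerate_cons, List.foldl_cons]
      rw [show tlcStepB (tlcStepB (p, d, true, false) (i, '\\')) (i + 1, head)
            = (p, d, true, false) from by simp [tlcStepB]]
      rw [show i + 1 + 1 = i + 2 from by ring]
      exact ih
  | case5 c rest i h1 h2 ih =>
      rw [tlcSkipStr_other c rest i h1 h2]
      simp only [PySem.List.enumerate_cons, List.foldl_cons]
      rw [show tlcStepB (p, d, true, false) (i, c) = (p, d, true, false) from by
            simp [tlcStepB, h1, h2]]
      exact ih

-- A's outer loop equals B's fold in the non-string state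
theorem tlc_loopA_eq_fold (l : List Char) (i : Int) (d : Int) (p : List Int) :
    tlcLoopA l i d p = ((PySem.List.enumerate l i).foldl tlcStepB (p, d, false, false)).1 := by
  induction l, i, d, p using tlcLoopA.induct with
  | case1 i d pos => rw [tlcLoopA.eq_def]; simp [PySem.List.enumerate_nil]
  | case2 c rest i d pos h ih =>
      rw [tlcLoopA.eq_def]
      simp only [if_pos h, PySem.List.enumerate_cons, List.foldl_cons]
      rw [show tlcStepB (pos, d, false, false) (i, c) = (pos, d + 1, false, false) from by
            simp [tlcStepB, h]]
      exact ih
  | case3 c rest i d pos h1 h2 ih =>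
      rw [tlcLoopA.eq_def]
      simp only [if_neg h1, if_pos h2, PySem.List.enumerate_cons, List.foldl_cons]
      rw [show tlcStepB (pos, d, false, false) (i, c) = (pos, d - 1, false, false) from by
            simp [tlcStepB, h1, h2]]
      exact ih
  | case4 rest i d pos r h1 h2 ih =>
      rw [tlcLoopA.eq_def]
      simp only [if_neg h1, if_neg h2, reduceIte, PySem.List.enumerate_cons, List.foldl_cons]
      rw [show tlcStepB (pos, d, false, false) (i, '"') = (pos, d, true, false) from by
            simp [tlcStepB]]
      rw [tlc_fold_instring]
      exact ih
  | case5 c rest i d pos h1 h2 h3 h4 ih =>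
      rw [tlcLoopA.eq_def]
      simp only [if_neg h1, if_neg h2, if_neg h3, if_pos h4, PySem.List.enumerate_cons,
        List.foldl_cons]
      rw [show tlcStepB (pos, d, false, false) (i, c) = (pos ++ [i], d, false, false) from by
            simp [tlcStepB, h4]]
      exact ih
  | case6 c rest i d pos h1 h2 h3 h4 ih =>
      rw [tlcLoopA.eq_def]
      simp only [if_neg h1, if_neg h2, if_neg h3, if_neg h4, PySem.List.enumerate_cons,
        List.foldl_cons]
      rw [show tlcStepB (pos, d, false, false) (i, c) = (pos, d, false, false) from by
            simp [tlcStepB, h1, h2, h3, h4]]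
      exact ih

-- ===== VERDICT (by name: the statement is the Claim_ definition above) =====
theorem top_level_commas_spec : Claim_equal_top_level_commas := by
  intro text _
  unfold Spec_top_level_commas top_level_commas top_level_commas_alt
  exact tlc_loopA_eq_fold _ _ _ _
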